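-- pv_equiv track=rewrite | github.com/owinhun/Baekjoon | 프로그래머스/unrated/135808. 과일 장수/과일 장수.py | solution
-- ===== SOURCE A (Python) =====
-- def solution(k, m, score):
--     cnt = 0
--     score.sort(reverse=True)
--
--     for i in range(0, len(score), m):
--         if i + m <= len(score):
--             cnt += score[i + m - 1]
--
--     cnt = cnt * m
--
--     return cnt
-- ===== SOURCE B (Python) =====
-- def solution(k, m, score):
--     # Sort ascending once; the smallest len(score) % m fruits are left over.
--     # Of the remaining fruit (ascending), the first of each m-chunk is that
--     # box's minimum; sum those minimums and sell each box at m * minimum.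
--     ordered = sorted(score)
--     rest = ordered[len(ordered) % m:]
--     total = 0
--     while rest:
--         total += rest[0]
--         rest = rest[m:]
--     return m * total
-- ===== Notes on version B (the rewrite author's own statement) =====
-- stated objective: simpler
-- what changed: A sorts descending and loops over strided indices with a guard, reading each box's minimum at index i+m-1 and multiplying at the end; B sorts ascending, drops the len%m leftover smallest fruits, and then walks the remainder chunk-by-chunk taking each chunk's first element (the box minimum) directly, with no index arithmetic or guard.
-- outside the precondition, e.g. on solution(5, -1, [1, 2]): A returns 0, B does not finish within the time limit
import Mathlib
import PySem

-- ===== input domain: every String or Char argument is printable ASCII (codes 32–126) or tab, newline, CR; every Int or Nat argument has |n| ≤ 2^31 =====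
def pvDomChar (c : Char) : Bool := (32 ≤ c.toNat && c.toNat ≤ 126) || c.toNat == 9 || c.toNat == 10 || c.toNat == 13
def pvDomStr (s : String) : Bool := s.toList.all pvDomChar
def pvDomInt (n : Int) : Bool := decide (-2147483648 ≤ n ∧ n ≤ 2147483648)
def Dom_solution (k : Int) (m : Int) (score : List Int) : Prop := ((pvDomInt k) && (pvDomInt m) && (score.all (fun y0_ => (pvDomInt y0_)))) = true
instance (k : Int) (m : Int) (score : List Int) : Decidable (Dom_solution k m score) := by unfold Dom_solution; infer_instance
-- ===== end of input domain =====

-- B sorts ascending, drops the len%m leftover smallest fruits and walks the rest chunk-by-chunk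
-- taking each chunk's head (the box minimum), instead of A's descending sort with a strided
-- guarded index loop: same O(n log n) cost, simpler traversal. (A sorts `score` in place; the
-- equivalence proved here is about the return value only.)


-- ===== PORT A =====
def solution (k : Int) (m : Int) (score : List Int) : Int :=
  -- cnt = 0; score.sort(reverse=True)
  let s := PySem.List.sorted score (fun x => x) true
  let n : Int := s.length
  -- for i in range(0, len(score), m): if i + m <= len(score): cnt += score[i + m - 1]
  let cnt := (PySem.List.pyRange 0 n m).foldl
    (fun acc i => if i + m ≤ n then acc + PySem.List.pyGetD s (i + m - 1) 0 else acc) 0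
  -- cnt = cnt * m; return cnt
  cnt * m

-- ===== PORT B =====
-- the 'while rest: total += rest[0]; rest = rest[m:]' loop of Source B;
-- '(x :: xs)[m:]' is 'xs.drop (m-1)' for 1 ≤ m (Pre_), written on the tail for termination
def sumStep (m : Int) : List Int → Int
  | [] => 0
  | x :: xs => x + sumStep m (xs.drop (m - 1).toNat)
termination_by l => l.length
decreasing_by simp [List.length_drop]

def solution_alt (k : Int) (m : Int) (score : List Int) : Int :=
  let ordered := PySem.List.sorted score (fun x => x) false
  let rest := PySem.List.slice ordered (some (PySem.Int.mod (ordered.length : Int) m)) none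
  m * sumStep m rest

-- ===== PRECONDITION & SPEC =====
-- Pre_ keeps the task's natural domain, positive box size m: for m = 0 Python A raises
-- ValueError (range step 0), and m < 0 is outside the natural domain (B's loop diverges there).
def Pre_solution (k : Int) (m : Int) (score : List Int) : Prop := 1 ≤ m
instance (k : Int) (m : Int) (score : List Int) : Decidable (Pre_solution k m score) := by unfold Pre_solution; infer_instance
def pvWitness_solution : Int × Int × List Int := (4, 3, [4, 1, 2, 2, 4, 2, 4])

def Spec_solution (k : Int) (m : Int) (score : List Int) (out : Int) : Prop := out = solution_alt k m score
instance (k : Int) (m : Int) (score : List Int) (out : Int) : Decidable (Spec_solution k m score out) := by unfold Spec_solution; infer_instance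

-- ===== CLAIM (what is proved, stated in full; the proofs are below) =====
def Claim_equal_solution : Prop := ∀ (k : Int) (m : Int) (score : List Int), Dom_solution k m score → Pre_solution k m score → Spec_solution k m score (solution k m score)

-- ===== LEMMAS AND PROOFS =====

-- sorted ascending is the reverse of sorted descending (Int entries, identity key)
theorem sorted_asc_eq_reverse (score : List Int) :
    PySem.List.sorted score (fun x => x) false = (PySem.List.sorted score (fun x => x) true).reverse := by
  apply PySem.List.sorted_id_eq_of_perm_of_pairwise
  · exact (List.reverse_perm _).trans (PySem.List.sorted_perm score (fun x => x) true)
  · exact List.pairwise_reverse.mpr (PySem.List.sorted_pairwise_rev score (fun x => x))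

-- getD through drop
theorem getD_drop_add (l : List Int) (i j : ℕ) (d : Int) :
    (l.drop i).getD j d = l.getD (i + j) d := by
  simp [List.getD_eq_getElem?_getD, List.getElem?_drop]

-- Python % on a natural number by a positive divisor is Nat mod
theorem pymod_natCast (n : ℕ) (m : Int) (hm : 1 ≤ m) :
    PySem.Int.mod (n : Int) m = ((n % m.toNat : ℕ) : Int) := by
  have hmm : m = ((m.toNat : ℕ) : Int) := by omega
  rw [hmm]
  simp [PySem.Int.mod, Int.fmod_eq_emod]

-- B's loop on a list of length q*M sums the elements at indices 0, M, 2M, …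
theorem sumStep_eq_sum (m : Int) (hm : 1 ≤ m) :
    ∀ (q : ℕ) (l : List Int), l.length = q * m.toNat →
      sumStep m l = ∑ j ∈ Finset.range q, l.getD (j * m.toNat) 0 := by
  intro q
  induction q with
  | zero =>
      intro l hl
      simp at hl
      subst hl
      simp [sumStep]
  | succ q ih =>
      intro l hl
      have hM : 1 ≤ m.toNat := by omega
      match l with
      | [] => simp at hl; omega
      | x :: xs =>
        have hstep : (m - 1).toNat = m.toNat - 1 := by omega
        have hxs : (xs.drop (m.toNat - 1)).length = q * m.toNat := by
          simp at hl ⊢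
          have h1 : (q + 1) * m.toNat = q * m.toNat + m.toNat := by rw [add_mul, one_mul]
          generalize q * m.toNat = a at *
          omega
        rw [sumStep, hstep, ih _ hxs, Finset.sum_range_succ']
        have hterm : ∀ j, (xs.drop (m.toNat - 1)).getD (j * m.toNat) 0
            = (x :: xs).getD ((j + 1) * m.toNat) 0 := by
          intro j
          rw [getD_drop_add]
          have h1 : (j + 1) * m.toNat = (m.toNat - 1 + j * m.toNat) + 1 := by
            rw [add_mul, one_mul]
            generalize j * m.toNat = a
            omega
          rw [h1, List.getD_cons_succ]
        simp only [hterm]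
        have h0 : (x :: xs).getD (0 * m.toNat) 0 = x := by simp
        rw [h0]
        ring

-- ((List.range n).map f).sum is the Finset.range sum
theorem list_map_range_sum (n : ℕ) (f : ℕ → Int) :
    ((List.range n).map f).sum = ∑ k ∈ Finset.range n, f k := rfl

-- A's guarded strided loop over range(0, n, m) accumulates init + Σ of the guarded values
theorem foldl_ite_add {α : Type} (P : α → Prop) [DecidablePred P] (v : α → Int) :
    ∀ (l : List α) (init : Int),
      l.foldl (fun acc i => if P i then acc + v i else acc) init
        = init + (l.map (fun i => if P i then v i else 0)).sum := by
  intro l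
  induction l with
  | nil => intro init; simp
  | cons x xs ih =>
      intro init
      simp only [List.foldl_cons, List.map_cons, List.sum_cons, ih]
      split_ifs <;> ring

-- A's guarded strided loop is the sum of s[(k+1)*M - 1] over k < len/M
theorem foldA_eq_sum (s : List Int) (m : Int) (hm : 1 ≤ m) :
    (PySem.List.pyRange 0 (s.length : Int) m).foldl
      (fun acc i => if i + m ≤ (s.length : Int) then acc + PySem.List.pyGetD s (i + m - 1) 0 else acc) 0
    = ∑ k ∈ Finset.range (s.length / m.toNat), s.getD ((k + 1) * m.toNat - 1) 0 := by
  have hM : 1 ≤ m.toNat := by omega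
  set M := m.toNat with hMdef
  have hmM : m = (M : Int) := by omega
  set n := s.length with hndef
  rw [PySem.List.pyRange_of_pos 0 (n : Int) (by omega)]
  rw [List.foldl_map, foldl_ite_add (fun k : ℕ => 0 + m * (k:Int) + m ≤ (n : Int)) (fun k : ℕ => PySem.List.pyGetD s (0 + m * (k:Int) + m - 1) 0)]
  rw [zero_add]
  rw [list_map_range_sum]
  by_cases hn : n = 0
  · simp [hn]
  · have hpos : (0:Int) < (n:Int) := by omega
    rw [if_pos hpos]
    have hL : (((n:Int) - 0 + m - 1) / m).toNat = (n + M - 1) / M := by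
      have h1 : ((n:Int) - 0 + m - 1) = ((n + M - 1 : ℕ) : Int) := by push_cast; omega
      rw [h1, hmM]
      norm_cast
    rw [hL]
    have hqL : n / M ≤ (n + M - 1) / M := Nat.div_le_div_right (by omega)
    -- restrict the guarded sum to the indices where the guard holds
    have hguard : ∀ k : ℕ, (0 + m * (k:Int) + m ≤ (n:Int)) ↔ k < n / M := by
      intro k
      rw [hmM]
      constructor
      · intro h
        have h1 : ((k:Int) + 1) * (M:Int) ≤ (n:Int) := by push_cast at h ⊢; nlinarith
        have h2 : (k + 1) * M ≤ n := by exact_mod_cast h1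
        exact (Nat.le_div_iff_mul_le (by omega)).mpr h2
      · intro h
        have h2 : (k + 1) * M ≤ n := (Nat.le_div_iff_mul_le (by omega)).mp h
        have h1 : ((k:Int) + 1) * (M:Int) ≤ (n:Int) := by exact_mod_cast h2
        push_cast
        nlinarith
    have hfilter : Finset.filter (fun k => k < n / M) (Finset.range ((n + M - 1) / M)) = Finset.range (n / M) := by
      apply Finset.ext
      intro a
      simp only [Finset.mem_filter, Finset.mem_range]
      omega
    calc ∑ k ∈ Finset.range ((n + M - 1) / M),
            (if 0 + m * (k:Int) + m ≤ (n:Int) then PySem.List.pyGetD s (0 + m * (k:Int) + m - 1) 0 else 0)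
        = ∑ k ∈ Finset.range ((n + M - 1) / M),
            (if k < n / M then PySem.List.pyGetD s (0 + m * (k:Int) + m - 1) 0 else 0) := by
          apply Finset.sum_congr rfl
          intro k _
          rw [if_congr (hguard k) rfl rfl]
      _ = ∑ k ∈ Finset.range (n / M), PySem.List.pyGetD s (0 + m * (k:Int) + m - 1) 0 := by
          rw [← Finset.sum_filter, hfilter]
      _ = ∑ k ∈ Finset.range (n / M), s.getD ((k + 1) * M - 1) 0 := by
          apply Finset.sum_congr rfl
          intro k hk
          have e1 : (k + 1) * M - 1 = k * M + (M - 1) := by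
            rw [add_mul, one_mul]
            generalize k * M = a
            omega
          have hidx : 0 + m * (k:Int) + m - 1 = (((k + 1) * M - 1 : ℕ) : Int) := by
            rw [hmM, e1, Nat.cast_add, Nat.cast_mul, Nat.cast_sub hM]
            push_cast
            ring
          rw [hidx, PySem.List.pyGetD_natCast]

-- ===== VERDICT (by name: the statement is the Claim_ definition above) =====
theorem solution_spec : Claim_equal_solution := by
  intro k m score _ hpre
  have hm : 1 ≤ m := hpre
  have hM : 1 ≤ m.toNat := by omega
  unfold Spec_solution
  simp only [solution, solution_alt]
  rw [sorted_asc_eq_reverse score]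
  set s := PySem.List.sorted score (fun x => x) true with hs
  set M := m.toNat with hMdef
  set n := s.length with hn
  set q := n / M with hq
  have hlenrev : s.reverse.length = n := by rw [List.length_reverse]
  rw [hlenrev, pymod_natCast n m hm, PySem.List.slice_from_natCast]
  have hrest : (s.reverse.drop (n % M)).length = q * M := by
    have hdm : M * q + n % M = n := Nat.div_add_mod n M
    have hcomm : q * M = M * q := mul_comm q M
    simp only [List.length_drop, hlenrev]
    generalize M * q = b at hdm hcomm
    omega
  rw [sumStep_eq_sum m hm q _ hrest, foldA_eq_sum s m hm]
  rw [mul_comm]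
  congr 1
  have hterm : ∀ j ∈ Finset.range q, (s.reverse.drop (n % M)).getD (j * M) 0
      = s.getD ((q - 1 - j + 1) * M - 1) 0 := by
    intro j hj
    rw [Finset.mem_range] at hj
    rw [getD_drop_add]
    have hdm : M * q + n % M = n := Nat.div_add_mod n M
    have hjq : (j + 1) * M ≤ q * M := Nat.mul_le_mul_right M (by omega)
    have e2 : q - 1 - j + 1 = q - j := by omega
    rw [e2, Nat.sub_mul]
    have ea : (j + 1) * M = j * M + M := by rw [add_mul, one_mul]
    have hilt : n % M + j * M < n := by
      have hcomm : q * M = M * q := mul_comm q M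
      generalize j * M = a at *
      generalize M * q = b at *
      omega
    rw [List.getD_eq_getElem?_getD, List.getD_eq_getElem?_getD,
        List.getElem?_reverse (by exact hilt)]
    rw [show s.length = n from rfl]
    have eidx : n - 1 - (n % M + j * M) = q * M - j * M - 1 := by
      have hcomm : q * M = M * q := mul_comm q M
      generalize j * M = a at *
      generalize M * q = b at *
      omega
    rw [eidx]
  rw [Finset.sum_congr rfl hterm,
      Finset.sum_range_reflect (fun k => s.getD ((k + 1) * M - 1) 0) q]
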